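/-
  THE SEGMENTS OF `DGifDecreaseImageCounter` (dgif_lib.c:1156-1179; 10A460H … 10A56FH, 70 instructions; NO protected frame): the
  assertions at its three cut points, the segment claims, and the COMPOSITION (segments ⇒ `DGifDecreaseImageCounter.spec`), proved
  here.

  THE CODE:
      10A460H  two pushes (rbp rbx), `sub rsp, 8`                                        rsp = RA − 24
      10A466H  `rbx = gif`; `ebp = --gif.ImageCount` (checked load, store)
      10A47BH  `rbp = &gif.SavedImages[ImageCount]` (checked load); its `RasterBits` (checked) not NULL: `free(it)`
      10A4B1H  CUT 1  `rbp = &gif.SavedImages[ImageCount]` again (two checked loads); its `ImageDesc.ColorMap` (checked) not NULL: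
               `GifFreeMapObject(it)`
      10A4F2H  CUT 2  `ebp = gif.ImageCount` (checked); `<= 0` → 10A538H: `free(gif.SavedImages)`, the checked stores
               `gif.SavedImages = NULL`, `gif.ImageCount = 0` → 10A531H
      10A502H  `reallocarray(gif.SavedImages, ebp, 56)`; not NULL: the checked store of `gif.SavedImages`
      10A531H  CUT 3  `add rsp, 8`, two pops, `ret`

  SEGMENTS:
      DGifDecreaseImageCounter.1   10A460H … 10A4B1H                      22 instructions   free                          → `AfterRaster`
      DGifDecreaseImageCounter.2   10A4B1H … 10A4F2H                      15 instructions   GifFreeMapObject              → `AfterMap`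
      DGifDecreaseImageCounter.3   10A4F2H … 10A531H, 10A538H … 10A56FH  29 instructions   openbsd_reallocarray | free   → `Done`
      DGifDecreaseImageCounter.E   10A531H … 10A538H                       4 instructions   —                             → `Returned`

  WHY NO POINTER DANGLES IN A COUNTED SLOT. The FIRST statement is `ImageCount--`: from then on the dropped slot is not counted, and
  the memory has the shape of the forest `dropped F s init` (`F` with the array's images `init`: `SavedAt.drop_last`) at every cut;
  the two pointers of the dropped slot dangle in an UNCOUNTED slot, which `Shape` does not read. What the cuts add to the state
  invariant of `dropped F s init`: at CUT 1 the dropped slot's colour map is still LIVE and still to be freed: it is owned BESIDES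
  the forest's objects (`Shape` and `Owns` separately), and the slot's field holds it (`cm`). At CUT 2 and CUT 3: `GifOK`.
-/
import Gif.Spec.Slurp
import Gif.Spec.ForestCarry
import Gif.LabelsAt
namespace Gif.Spec
open X86 X86.User Asan ProgX.Base ProgX.Base.Spec

namespace DGifDecreaseImageCounter

/-- **The forest without the dropped image**: `F` with the array `s` counting the images `init` only (same array, same capacity).
The memory has its shape from the store `ImageCount--` on. -/
def dropped (F : Forest) (s : Saved) (init : List Img) : Forest := { F with saved := some { s with imgs := init } }

/-- The forest without the dropped image differs from `F` in `saved` only (the post's `F.SameButSaved F'`, failed-shrink arm). -/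
theorem dropped_sameBut (F : Forest) (s : Saved) (init : List Img) : F.SameButSaved (dropped F s init) :=
  ⟨rfl, rfl, rfl, rfl, rfl⟩

/-- … and counts the images `init` (the post's `F'.imgs = init`). -/
theorem dropped_imgs (F : Forest) (s : Saved) (init : List Img) : (dropped F s init).imgs = init := rfl

/-- **The objects of `F` are those of the dropped image and those of the forest without it** (`g.ext = none`: the image owns its
colour map and its raster only): for `Owns.perm` at the entry, and for `Owns.release` at the two `free`s. -/
theorem owned_dropped (F : Forest) (s : Saved) (init : List Img) (g : Img) (hs : F.saved = some s) (hi : s.imgs = init ++ [g])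
    (hg : g.ext = none) :
    F.owned.Perm (rasterObjs g.raster ++ (Map.objs g.cm ++ (dropped F s init).owned)) := by
  have e1 : Img.objs g = Map.objs g.cm ++ rasterObjs g.raster := by
    unfold Img.objs
    rw [hg]
    simp only [Exts.objs, List.append_nil]
  have e2 : s = ⟨s.arr, s.cap, init ++ [g]⟩ := by
    obtain ⟨arr, cap, imgs⟩ := s
    simp only at hi
    rw [hi]
  have h1 : F.owned.Perm (Saved.objs (some ⟨s.arr, s.cap, init ++ [g]⟩) ++ F.ownedButSaved) := by
    have h := F.owned_saved
    rw [hs, e2] at h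
    exact h
  have h2 : (Saved.objs (some ⟨s.arr, s.cap, init ++ [g]⟩) ++ F.ownedButSaved).Perm
      ((Img.objs g ++ Saved.objs (some ⟨s.arr, s.cap, init⟩)) ++ F.ownedButSaved) :=
    (Saved.objs_snoc s.arr s.cap init g).append_right _
  have h3 : (dropped F s init).owned.Perm (Saved.objs (some ⟨s.arr, s.cap, init⟩) ++ F.ownedButSaved) :=
    (dropped F s init).owned_saved
  have h4 : ((Img.objs g ++ Saved.objs (some ⟨s.arr, s.cap, init⟩)) ++ F.ownedButSaved).Perm
      (Img.objs g ++ (dropped F s init).owned) := by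
    rw [List.append_assoc]
    exact h3.symm.append_left _
  have h5 : (Img.objs g ++ (dropped F s init).owned).Perm
      (rasterObjs g.raster ++ (Map.objs g.cm ++ (dropped F s init).owned)) := by
    rw [e1, List.append_assoc]
    exact List.perm_append_comm_assoc _ _ _
  exact ((h1.trans h2).trans h4).trans h5

/-- **AFTER THE RASTER IS FREED** (at 10A4B1H, l.1161), inside the call entered at `e` (return address `ret`) with the function's
precondition, for the array `s` (`F.saved = some s`). Two registers are saved, `rsp = RA − 24`; `rbx = gif` (`rbp` is dead:
recomputed); `r12 … r15` never touched. The present heap is `Hc` (`H`, or `H` with the raster freed); `gif.ImageCount` is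
decremented: the memory has the shape of `dropped F s init`; the objects of that forest AND the two objects of the dropped
slot's colour map (if any) are live; the dropped slot's `ImageDesc.ColorMap` field (slot `init.length` of the array: behind the
counted ones, inside the array's capacity) holds that map. -/
structure AfterRaster (H : Heap) (rest : List Obj) (frames : List (Nat × FrameLayout)) (F : Forest) (R : Rd) (init : List Img)
    (g : Img) (s : Saved) (Hc : Heap) (u₀ e : State) (ret : Word) (v : State) : Prop where
  /-- the function was entered at `e` … -/
  entry : AtEntry (conv u₀) Gif.L.DGifDecreaseImageCounter.entry
    (DGifDecreaseImageCounter.spec H rest frames F R init g).frame ret e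
  /-- … with its precondition -/
  pre : (DGifDecreaseImageCounter.spec H rest frames F R init g).pre e
  /-- the array of the forest, whose last image is the dropped one -/
  saved : F.saved = some s
  imgs : s.imgs = init ++ [g]
  rip : v.rip = Gif.L.DGifDecreaseImageCounter.at_10a4b1
  /-- two pushes and `sub rsp, 8` -/
  rsp : v.reg .rsp = e.reg .rsp - 24
  /-- `mov rbx, rdi`: gif -/
  rbx : v.reg .rbx = e.reg .rdi
  /-- `r12 … r15` are not used by the function -/
  r12 : v.reg .r12 = e.reg .r12
  r13 : v.reg .r13 = e.reg .r13
  r14 : v.reg .r14 = e.reg .r14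
  r15 : v.reg .r15 = e.reg .r15
  /-- the saved registers, in push order -/
  slot_rbp : v.mem.readLE (e.reg .rsp - 8) 8 = (e.reg .rbp).toNat
  slot_rbx : v.mem.readLE (e.reg .rsp - 16) 8 = (e.reg .rbx).toNat
  /-- the return address is still in its slot (`ret` at 10A537H pops it): every store so far went below `RA` (the pushes, the
  callees' frames) or into the heap's region and the shadow (`gif.ImageCount`, `free`) -/
  slot_ra : UInt64.ofNat (v.mem.readLE (e.reg .rsp) 8) = ret
  /-- the present heap is at the place of the entry's -/
  region : SameRegion H Hc
  /-- the heap's invariant, the clean stack ending at the present stack pointer -/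
  inv : HeapInv Hc rest frames ((e.reg .rsp).toNat - 24) v.mem
  /-- the shape of the forest without the dropped image -/
  shape : Shape (dropped F s init) R v.mem
  /-- live: the dropped slot's colour map (still to be freed), and the forest without the dropped image -/
  owns : Owns Hc (Map.objs g.cm ++ (dropped F s init).owned)
  /-- the dropped slot's colour-map field -/
  cm : MapAt g.cm (SavedImage.ImageDesc.ColorMap v.mem (s.arr + 56 * init.length)) v.mem
  /-- no input was read -/
  rem : rem R v.mem = rem R e.mem
  /-- nothing was written but the function's stack and the contract's window (the heap's region and the shadow: ONE coarse window) -/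
  same : Mem.SameExcept
    [⟨(e.reg .rsp).toNat - 176, (e.reg .rsp).toNat⟩,
     ⟨0x800000, 0x1000020⟩] e.mem v.mem
  code : (conv u₀).code.In v.mem
  abi : (conv u₀).inv v

/-- **AFTER THE COLOUR MAP IS FREED** (at 10A4F2H, l.1166): as `AfterRaster`, and nothing of the dropped slot is live any more: the
STATE INVARIANT holds for the present heap and `dropped F s init` (the array still has its old capacity: one slot, at least, behind
the counted ones). -/
structure AfterMap (H : Heap) (rest : List Obj) (frames : List (Nat × FrameLayout)) (F : Forest) (R : Rd) (init : List Img)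
    (g : Img) (s : Saved) (Hc : Heap) (u₀ e : State) (ret : Word) (v : State) : Prop where
  entry : AtEntry (conv u₀) Gif.L.DGifDecreaseImageCounter.entry
    (DGifDecreaseImageCounter.spec H rest frames F R init g).frame ret e
  pre : (DGifDecreaseImageCounter.spec H rest frames F R init g).pre e
  saved : F.saved = some s
  imgs : s.imgs = init ++ [g]
  rip : v.rip = Gif.L.DGifDecreaseImageCounter.at_10a4f2
  rsp : v.reg .rsp = e.reg .rsp - 24
  /-- `rbx = gif` -/
  rbx : v.reg .rbx = e.reg .rdi
  r12 : v.reg .r12 = e.reg .r12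
  r13 : v.reg .r13 = e.reg .r13
  r14 : v.reg .r14 = e.reg .r14
  r15 : v.reg .r15 = e.reg .r15
  slot_rbp : v.mem.readLE (e.reg .rsp - 8) 8 = (e.reg .rbp).toNat
  slot_rbx : v.mem.readLE (e.reg .rsp - 16) 8 = (e.reg .rbx).toNat
  /-- the return address is still in its slot (`ret` at 10A537H pops it) -/
  slot_ra : UInt64.ofNat (v.mem.readLE (e.reg .rsp) 8) = ret
  region : SameRegion H Hc
  inv : HeapInv Hc rest frames ((e.reg .rsp).toNat - 24) v.mem
  /-- the state invariant of the forest without the dropped image -/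
  ok : GifOK Hc (dropped F s init) R v.mem
  rem : rem R v.mem = rem R e.mem
  same : Mem.SameExcept
    [⟨(e.reg .rsp).toNat - 176, (e.reg .rsp).toNat⟩,
     ⟨0x800000, 0x1000020⟩] e.mem v.mem
  code : (conv u₀).code.In v.mem
  abi : (conv u₀).inv v

/-- **BEFORE THE EPILOGUE** (at 10A531H, l.1179: the returns join here): the contract's postcondition holds of the present memory,
the present heap `Hc` and the present forest `Fc` — `F` but for `saved`, with the images `init` — with the present stack pointer
for the caller's. -/
structure Done (H : Heap) (rest : List Obj) (frames : List (Nat × FrameLayout)) (F : Forest) (R : Rd) (init : List Img)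
    (g : Img) (Hc : Heap) (Fc : Forest) (u₀ e : State) (ret : Word) (v : State) : Prop where
  entry : AtEntry (conv u₀) Gif.L.DGifDecreaseImageCounter.entry
    (DGifDecreaseImageCounter.spec H rest frames F R init g).frame ret e
  pre : (DGifDecreaseImageCounter.spec H rest frames F R init g).pre e
  rip : v.rip = Gif.L.DGifDecreaseImageCounter.at_10a531
  rsp : v.reg .rsp = e.reg .rsp - 24
  r12 : v.reg .r12 = e.reg .r12
  r13 : v.reg .r13 = e.reg .r13
  r14 : v.reg .r14 = e.reg .r14
  r15 : v.reg .r15 = e.reg .r15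
  slot_rbp : v.mem.readLE (e.reg .rsp - 8) 8 = (e.reg .rbp).toNat
  slot_rbx : v.mem.readLE (e.reg .rsp - 16) 8 = (e.reg .rbx).toNat
  /-- the return address is still in its slot: `ret` at 10A537H pops it -/
  slot_ra : UInt64.ofNat (v.mem.readLE (e.reg .rsp) 8) = ret
  region : SameRegion H Hc
  /-- the present forest differs from the entry's in `saved` only, and counts the images `init` -/
  sameBut : F.SameButSaved Fc
  imgs : Fc.imgs = init
  inv : HeapInv Hc rest frames ((e.reg .rsp).toNat - 24) v.mem
  ok : GifOK Hc Fc R v.mem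
  rem : rem R v.mem = rem R e.mem
  same : Mem.SameExcept
    [⟨(e.reg .rsp).toNat - 176, (e.reg .rsp).toNat⟩,
     ⟨0x800000, 0x1000020⟩] e.mem v.mem
  code : (conv u₀).code.In v.mem
  abi : (conv u₀).inv v

/-- **Segment 1** (10A460H … 10A4B1H; 22 instructions; l.1156-1160): the prologue; `ImageCount--` (the checked load, the store:
`length − 1 = init.length`; `Shape.set_saved` with `SavedAt.drop_last`); the address of the dropped slot (`s.arr + 56 ·
init.length`, inside the array: `length ≤ cap`); the checked load of its `RasterBits`: not NULL (`g.raster = some r`: `RasterAt`):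
`free(r)` (`free.spec` with `n = r.2`; `owned_dropped` for what stays live: `Owns.release`). -/
def Seg1 (Lay : Layout) (μ : Microarch) (u₀ : State) : Prop :=
  ∀ (H : Heap) (rest : List Obj) (frames : List (Nat × FrameLayout)) (F : Forest) (R : Rd) (init : List Img) (g : Img)
    (e : State) (ret : Word),
    AtEntry (conv u₀) Gif.L.DGifDecreaseImageCounter.entry (DGifDecreaseImageCounter.spec H rest frames F R init g).frame ret e →
    (DGifDecreaseImageCounter.spec H rest frames F R init g).pre e →
    ReachVia Lay μ WayInv e (fun w => ∃ s Hc, AfterRaster H rest frames F R init g s Hc u₀ e ret w)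

/-- **Segment 2** (10A4B1H … 10A4F2H; 15 instructions; l.1161-1163): the address of the dropped slot again (the checked loads of
`gif.SavedImages`, `gif.ImageCount`), the checked load of its `ImageDesc.ColorMap`: not NULL (`g.cm = some m`): `GifFreeMapObject`
(`GifFreeMapObject.spec` with `colors = m.colors`, `n = 3 · m.count`; both objects are live and different: `owns`). Afterwards
only the forest's objects are owned: `GifOK`. -/
def Seg2 (Lay : Layout) (μ : Microarch) (u₀ : State) : Prop :=
  ∀ (H : Heap) (rest : List Obj) (frames : List (Nat × FrameLayout)) (F : Forest) (R : Rd) (init : List Img) (g : Img)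
    (s : Saved) (Hc : Heap) (e : State) (ret : Word) (v : State),
    AfterRaster H rest frames F R init g s Hc u₀ e ret v →
    ReachVia Lay μ WayInv v (fun w => ∃ Hc', AfterMap H rest frames F R init g s Hc' u₀ e ret w)

/-- **Segment 3** (10A4F2H … 10A531H, 10A538H … 10A56FH; 29 instructions; l.1166-1178): the checked load of `gif.ImageCount`.
`init = []`: `free(gif.SavedImages)` (the array: `Saved.objs_some`, `Forest.owned_saved`, `Owns.release_head`), the checked stores
of NULL and 0: the forest with `saved := none`. Otherwise `reallocarray(gif.SavedImages, init.length, 56)`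
(`openbsd_reallocarray.spec` with `n = 56 · s.cap`, `c` from `Hc.Live`; the factors are `1 ≤ init.length < 2^31` and 56): NULL:
nothing changes (`dropped F s init`, the array one slot longer than the count); in place (`Owns.resize_head`; the checked store
of the same address) or moved (`SavedAt.moved`, `Owns.push_cons`, `Owns.release`; the checked store of the new address): the
array `⟨rax, init.length, init⟩`. -/
def Seg3 (Lay : Layout) (μ : Microarch) (u₀ : State) : Prop :=
  ∀ (H : Heap) (rest : List Obj) (frames : List (Nat × FrameLayout)) (F : Forest) (R : Rd) (init : List Img) (g : Img)
    (s : Saved) (Hc : Heap) (e : State) (ret : Word) (v : State),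
    AfterMap H rest frames F R init g s Hc u₀ e ret v →
    ReachVia Lay μ WayInv v (fun w => ∃ Hc' Fc', Done H rest frames F R init g Hc' Fc' u₀ e ret w)

/-- **Segment E** (10A531H … 10A538H; 4 instructions; l.1179): `add rsp, 8`, two pops, `ret`: the contract's `Returned` (`Back2` for
`Hc`, `Fc`; `HeapPre.raise_back` lifts the heap's invariant to the caller's stack pointer). -/
def SegE (Lay : Layout) (μ : Microarch) (u₀ : State) : Prop :=
  ∀ (H : Heap) (rest : List Obj) (frames : List (Nat × FrameLayout)) (F : Forest) (R : Rd) (init : List Img) (g : Img)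
    (Hc : Heap) (Fc : Forest) (e : State) (ret : Word) (v : State),
    Done H rest frames F R init g Hc Fc u₀ e ret v →
    ReachVia Lay μ WayInv v (Returned (conv u₀) (DGifDecreaseImageCounter.spec H rest frames F R init g) e ret)

/-- **The composition of `DGifDecreaseImageCounter`**: the four segments chain into the function's contract. -/
theorem compose {Lay : Layout} {μ : Microarch} {u₀ : State} (h1 : Seg1 Lay μ u₀) (h2 : Seg2 Lay μ u₀) (h3 : Seg3 Lay μ u₀)
    (hE : SegE Lay μ u₀) :
    ∀ (H : Heap) (rest : List Obj) (frames : List (Nat × FrameLayout)) (F : Forest) (R : Rd) (init : List Img) (g : Img),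
      Calls Lay μ WayInv (conv u₀) Gif.L.DGifDecreaseImageCounter.entry
        (DGifDecreaseImageCounter.spec H rest frames F R init g) := by
  intro H rest frames F R init g e ret he hp
  refine (h1 H rest frames F R init g e ret he hp).trans ?_
  intro v hv
  obtain ⟨s, Hc, hv⟩ := hv
  refine (h2 H rest frames F R init g s Hc e ret v hv).trans ?_
  intro w hw
  obtain ⟨Hc', hw⟩ := hw
  refine (h3 H rest frames F R init g s Hc' e ret w hw).trans ?_
  intro x hx
  obtain ⟨Hc'', Fc, hx⟩ := hx
  exact hE H rest frames F R init g Hc'' Fc e ret x hx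

end DGifDecreaseImageCounter

end Gif.Spec
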